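-- pv_equiv track=rewrite | github.com/Lanch3ros/MiPrimerRepo | T14/T14.2 Lancheros Ayora José Luis.py | vocales_una_vez
-- ===== SOURCE A (Python) =====
-- def vocales_una_vez(palabra, tam_palabra):
--     vocales = ['a', 'e', 'i', 'o', 'u']
--     conteo_vocales = {vocal: 0 for vocal in vocales}
--
--     for i in range(tam_palabra):
--         letra = palabra[i]
--         if letra in conteo_vocales:
--             conteo_vocales[letra] += 1
--
--     for vocal in vocales:
--         if conteo_vocales[vocal] != 1:
--             return False
--     return True
-- ===== SOURCE B (Python) =====
-- def vocales_una_vez(palabra, tam_palabra):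
--     encontradas = [palabra[i] for i in range(tam_palabra) if palabra[i] in "aeiou"]
--     return sorted(encontradas) == ['a', 'e', 'i', 'o', 'u']
-- ===== Notes on version B (the rewrite author's own statement) =====
-- stated objective: simpler
-- what changed: Replaces the per-vowel counter dict plus a second verification loop by a single comprehension that collects the vowels encountered and one sorted-multiset comparison against ['a','e','i','o','u'].
import Mathlib
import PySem

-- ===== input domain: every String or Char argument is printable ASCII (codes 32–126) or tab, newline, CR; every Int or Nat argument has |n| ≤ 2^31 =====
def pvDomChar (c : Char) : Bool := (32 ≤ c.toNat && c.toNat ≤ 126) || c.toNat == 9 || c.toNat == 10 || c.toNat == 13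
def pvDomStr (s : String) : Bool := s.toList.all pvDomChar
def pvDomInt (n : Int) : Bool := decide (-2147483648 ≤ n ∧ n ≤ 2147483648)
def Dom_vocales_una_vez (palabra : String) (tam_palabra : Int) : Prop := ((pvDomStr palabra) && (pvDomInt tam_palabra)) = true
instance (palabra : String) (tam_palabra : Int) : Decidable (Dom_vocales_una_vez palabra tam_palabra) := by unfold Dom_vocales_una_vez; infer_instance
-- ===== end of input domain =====

-- B replaces A's per-vowel counter dict + verification loop by collect-the-vowels + one sorted comparison (objective: simpler).


-- ===== PORT A =====
-- one index-loop step 'c = palabra[i]' feeding g; none = IndexError in Python (excluded by Pre_)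
def pvIdxStep {α : Type} (s : String) (g : α → Char → α) (a : α) (i : Int) : α :=
  match PySem.Str.pyGet? s i with
  | none => a
  | some c => g a c

def pvVocales : List Char := ['a', 'e', 'i', 'o', 'u']

def vocales_una_vez (palabra : String) (tam_palabra : Int) : Bool :=
  -- conteo_vocales = {vocal: 0 for vocal in vocales}
  let conteo0 : PySem.Dict Char Int :=
    pvVocales.foldl (fun d v => d.insert v 0) PySem.Dict.empty
  -- for i in range(tam_palabra): letra = palabra[i]; if letra in conteo_vocales: conteo_vocales[letra] += 1
  let conteo : PySem.Dict Char Int :=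
    (PySem.List.pyRange 0 tam_palabra 1).foldl
      (pvIdxStep palabra (fun d letra => if d.contains letra then d.modify letra 0 (· + 1) else d)) conteo0
  -- for vocal in vocales: if conteo_vocales[vocal] != 1: return False / return True
  pvVocales.all (fun vocal => conteo.getD vocal 0 == 1)

-- ===== PORT B =====
def vocales_una_vez_alt (palabra : String) (tam_palabra : Int) : Bool :=
  -- encontradas = [palabra[i] for i in range(tam_palabra) if palabra[i] in "aeiou"]
  -- (for a single char, Python's `c in "aeiou"` is exactly membership in the char list)
  let encontradas : List Char :=
    (PySem.List.pyRange 0 tam_palabra 1).foldl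
      (pvIdxStep palabra (fun acc c => if pvVocales.contains c then acc ++ [c] else acc)) []
  -- return sorted(encontradas) == ['a','e','i','o','u']
  PySem.List.sorted encontradas (fun x => x) false == pvVocales

-- ===== PRECONDITION & SPEC =====
-- Pre_ excludes exactly the inputs where the Python A raises IndexError (tam_palabra > len(palabra)); B raises there too.
def Pre_vocales_una_vez (palabra : String) (tam_palabra : Int) : Prop :=
  tam_palabra ≤ PySem.Str.len palabra
instance (palabra : String) (tam_palabra : Int) : Decidable (Pre_vocales_una_vez palabra tam_palabra) := by
  unfold Pre_vocales_una_vez; infer_instance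

def pvWitness_vocales_una_vez : String × Int := ("aerouia", 5)

def Spec_vocales_una_vez (palabra : String) (tam_palabra : Int) (out : Bool) : Prop := out = vocales_una_vez_alt palabra tam_palabra
instance (palabra : String) (tam_palabra : Int) (out : Bool) : Decidable (Spec_vocales_una_vez palabra tam_palabra out) := by unfold Spec_vocales_una_vez; infer_instance

-- ===== CLAIM (what is proved, stated in full; the proofs are below) =====
def Claim_equal_vocales_una_vez : Prop := ∀ (palabra : String) (tam_palabra : Int), Dom_vocales_una_vez palabra tam_palabra → Pre_vocales_una_vez palabra tam_palabra → Spec_vocales_una_vez palabra tam_palabra (vocales_una_vez palabra tam_palabra)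

-- ===== LEMMAS AND PROOFS =====

-- an index loop over range(n) reading palabra[i], with n ≤ len, is a fold over the first n characters
theorem pvFoldIdx {α : Type} (s : String) (n : Nat) (h : n ≤ s.toList.length)
    (g : α → Char → α) (init : α) :
    (PySem.List.pyRange 0 (n : Int) 1).foldl (pvIdxStep s g) init
    = (s.toList.take n).foldl g init := by
  induction n generalizing init with
  | zero => simp [PySem.List.pyRange_one_eq_nil]
  | succ m ih =>
    have hm : m < s.toList.length := by omega
    rw [show ((m + 1 : Nat) : Int) = (m : Int) + 1 by push_cast; ring,
        PySem.List.pyRange_one_succ_right (by positivity),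
        List.foldl_append, ih (by omega),
        List.take_add_one, List.getElem?_eq_getElem hm]
    simp only [List.foldl_cons, List.foldl_nil, List.foldl_append,
      pvIdxStep, PySem.Str.pyGet?_natCast, List.getElem?_eq_getElem hm,
      Option.toList_some]

theorem pvContainsFold (M : List Char) (d : PySem.Dict Char Int)
    (hd : ∀ c, d.contains c = pvVocales.contains c) :
    M.foldl (fun d c => if d.contains c then d.modify c 0 (· + 1) else d) d
    = (M.filter (fun c => pvVocales.contains c)).foldl (fun d c => d.modify c 0 (· + 1)) d := by
  induction M generalizing d with
  | nil => rfl
  | cons c M ih =>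
    rw [List.foldl_cons, hd c]
    by_cases hc : pvVocales.contains c = true
    · rw [if_pos hc, List.filter_cons_of_pos hc, List.foldl_cons]
      refine ih _ (fun x => ?_)
      rw [PySem.Dict.contains_modify, hd x]
      by_cases hxc : x = c
      · subst hxc; rw [hc]; simp
      · simp [hxc]
    · rw [if_neg hc, List.filter_cons_of_neg (by simpa using hc)]
      exact ih _ hd

-- the initial dict literally evaluates, and its keys are the vowels
theorem pvConteo0 :
    pvVocales.foldl (fun (d : PySem.Dict Char Int) v => d.insert v 0) PySem.Dict.empty
    = PySem.Dict.mk [('a', 0), ('e', 0), ('i', 0), ('o', 0), ('u', 0)] := by decide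

theorem pvConteo0_contains (c : Char) :
    (PySem.Dict.mk [('a', (0:Int)), ('e', 0), ('i', 0), ('o', 0), ('u', 0)]).contains c
    = pvVocales.contains c := by
  rw [Bool.eq_iff_iff]
  simp only [PySem.Dict.contains_mk, pvVocales, List.contains_cons, List.contains_nil,
    Bool.or_eq_true, beq_iff_eq, List.any_cons, List.any_nil, Bool.or_false]
  tauto

theorem pvConteo0_getD (v : Char) (hv : v ∈ pvVocales) :
    (PySem.Dict.mk [('a', (0:Int)), ('e', 0), ('i', 0), ('o', 0), ('u', 0)]).getD v 0 = 0 := by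
  fin_cases hv <;> decide

-- the final comparison: a list of vowels sorts to exactly ['a','e','i','o','u'] iff each vowel occurs once
theorem pvSortedIff (F : List Char) (hF : ∀ c ∈ F, c ∈ pvVocales) :
    (PySem.List.sorted F (fun x => x) false = pvVocales)
    ↔ (∀ v ∈ pvVocales, F.count v = 1) := by
  constructor
  · intro h v hv
    have hperm : F.Perm pvVocales := by
      have := PySem.List.sorted_perm F (fun x => x) false
      rw [h] at this; exact this.symm
    rw [hperm.count_eq]
    fin_cases hv <;> decide
  · intro h
    apply PySem.List.sorted_eq_of_perm_of_pairwise_lt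
    · rw [List.perm_iff_count]
      intro x
      by_cases hx : x ∈ pvVocales
      · rw [h x hx]; fin_cases hx <;> decide
      · rw [List.count_eq_zero_of_not_mem (fun hmem => hx (hF x hmem)),
            List.count_eq_zero_of_not_mem hx]
    · decide

-- ===== VERDICT (by name: the statement is the Claim_ definition above) =====
theorem vocales_una_vez_spec : Claim_equal_vocales_una_vez := by
  intro palabra tam_palabra _ hpre
  unfold Spec_vocales_una_vez
  simp only [vocales_una_vez, vocales_una_vez_alt]
  by_cases hneg : tam_palabra ≤ 0
  · rw [PySem.List.pyRange_one_eq_nil hneg]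
    simp only [List.foldl_nil]
    rw [pvConteo0]
    decide
  · rw [not_le] at hneg
    obtain ⟨n, rfl⟩ : ∃ n : Nat, tam_palabra = (n : Int) :=
      ⟨tam_palabra.toNat, (Int.toNat_of_nonneg (le_of_lt hneg)).symm⟩
    have hlen : n ≤ palabra.toList.length := by
      unfold Pre_vocales_una_vez at hpre
      rw [PySem.Str.len_eq] at hpre
      exact_mod_cast hpre
    have hA := pvFoldIdx palabra n hlen
      (fun (d : PySem.Dict Char Int) (letra : Char) =>
        if d.contains letra then d.modify letra 0 (· + 1) else d)
      (pvVocales.foldl (fun d v => d.insert v 0) PySem.Dict.empty)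
    have hB := pvFoldIdx palabra n hlen
      (fun (acc : List Char) (c : Char) => if pvVocales.contains c then acc ++ [c] else acc) []
    rw [hA, hB, pvConteo0,
        pvContainsFold _ _ pvConteo0_contains,
        PySem.List.foldl_append_if_eq_filter]
    set F := (palabra.toList.take n).filter (fun c => pvVocales.contains c) with hFdef
    have hF : ∀ c ∈ F, c ∈ pvVocales := by
      intro c hc
      have := List.of_mem_filter hc
      simpa using this
    rw [Bool.eq_iff_iff]
    simp only [List.all_eq_true, beq_iff_eq, List.nil_append]
    rw [pvSortedIff F hF]
    constructor
    · intro h v hv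
      have := h v hv
      rw [PySem.Dict.getD_foldl_modify_add_one, pvConteo0_getD v hv, zero_add] at this
      exact_mod_cast this
    · intro h v hv
      rw [PySem.Dict.getD_foldl_modify_add_one, pvConteo0_getD v hv, zero_add]
      exact_mod_cast h v hv
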